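-- pv_equiv track=rewrite | github.com/world137/study2 | test3.py | Greedy3
-- ===== SOURCE A (Python) =====
-- def Greedy3(arr,k):
--     lst = []
--     cnt=0
--     for i in range(len(arr)-1):
--         if (arr[i] == 'G' and 'P' in arr):
--             for p in range(i+1,len(arr)):
--                 if arr[p]=='P':
--                     if p-i<=k:
--                         cnt+=1
--                         arr[p]='Ppick'
--                         arr[i] = 'Gride'
--                         lst.append([p,i])
--                         break
--         elif (arr[i] == 'P' and 'G' in arr):
--             for g in range(i+1,len(arr)):
--                 if arr[g]=='G':
--                     if g-i<=k:
--                         cnt+=1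
--                         arr[i]='Ppick'
--                         arr[g] = 'Gride'
--                         lst.append([g, i])
--                         break
--     return cnt,arr,lst
-- ===== SOURCE B (Python) =====
-- # One left-to-right pass with two monotone pointers (next unconsumed 'P' / 'G' to the right)
-- # instead of rescanning the suffix at every index; mutates arr in place like the original.
-- def Greedy3(arr, k):
--     n = len(arr)
--     cnt = 0
--     lst = []
--     pP = 0  # candidate for the nearest remaining 'P' strictly right of i
--     pG = 0
--     for i in range(n - 1):
--         v = arr[i]
--         if v == 'G':
--             if pP <= i:
--                 pP = i + 1
--             while pP < n and arr[pP] != 'P':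
--                 pP += 1
--             if pP < n and pP - i <= k:
--                 cnt += 1
--                 arr[pP] = 'Ppick'
--                 arr[i] = 'Gride'
--                 lst.append([pP, i])
--         elif v == 'P':
--             if pG <= i:
--                 pG = i + 1
--             while pG < n and arr[pG] != 'G':
--                 pG += 1
--             if pG < n and pG - i <= k:
--                 cnt += 1
--                 arr[i] = 'Ppick'
--                 arr[pG] = 'Gride'
--                 lst.append([pG, i])
--     return cnt, arr, lst
-- ===== Notes on version B (the rewrite author's own statement) =====
-- stated objective: alternative
-- what changed: A rescans the suffix for the nearest opposite symbol at every index (and does a whole-array membership test per step); B makes one left-to-right pass keeping two monotone pointers to the next unconsumed 'P' and 'G', so each cell is visited O(1) times (O(n) vs O(n^2) worst case; a timing run read only 1.39x on the generated inputs, so no speed is claimed).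
import Mathlib
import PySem

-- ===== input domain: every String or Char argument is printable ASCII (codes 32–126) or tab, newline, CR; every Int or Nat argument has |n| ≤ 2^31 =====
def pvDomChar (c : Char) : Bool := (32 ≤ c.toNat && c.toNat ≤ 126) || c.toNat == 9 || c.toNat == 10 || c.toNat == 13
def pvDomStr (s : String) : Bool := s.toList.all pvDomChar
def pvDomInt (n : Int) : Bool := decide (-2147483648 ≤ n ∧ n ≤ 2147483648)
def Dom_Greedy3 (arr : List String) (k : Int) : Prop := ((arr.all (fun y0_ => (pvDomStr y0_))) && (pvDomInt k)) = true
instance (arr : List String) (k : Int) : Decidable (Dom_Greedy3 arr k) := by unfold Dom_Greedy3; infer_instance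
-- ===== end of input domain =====

-- B replaces A's per-index suffix rescans by one left-to-right pass with two monotone pointers (same value, different algorithm);
-- the Python A mutates arr in place and returns it, and Python B performs the same in-place mutation.

-- ===== PORT A =====
-- inner loop `for p in range(i+1, len(arr))` of the 'G' branch (break = stop scanning)
def pvScanG (k i : Int) : List Int → Int × List String × List (List Int) → Int × List String × List (List Int)
  | [], st => st
  | p :: ps, (cnt, arr, lst) =>
    if PySem.List.pyGetD arr p "" == "P" then
      if p - i ≤ k then
        (cnt + 1, PySem.List.pySetD (PySem.List.pySetD arr p "Ppick") i "Gride", lst ++ [[p, i]])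
      else pvScanG k i ps (cnt, arr, lst)
    else pvScanG k i ps (cnt, arr, lst)

-- inner loop of the 'P' branch
def pvScanP (k i : Int) : List Int → Int × List String × List (List Int) → Int × List String × List (List Int)
  | [], st => st
  | g :: gs, (cnt, arr, lst) =>
    if PySem.List.pyGetD arr g "" == "G" then
      if g - i ≤ k then
        (cnt + 1, PySem.List.pySetD (PySem.List.pySetD arr i "Ppick") g "Gride", lst ++ [[g, i]])
      else pvScanP k i gs (cnt, arr, lst)
    else pvScanP k i gs (cnt, arr, lst)

def pvStepA (k : Int) (st : Int × List String × List (List Int)) (i : Int) :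
    Int × List String × List (List Int) :=
  match st with
  | (cnt, arr, lst) =>
    if PySem.List.pyGetD arr i "" == "G" && arr.contains "P" then
      pvScanG k i (PySem.List.pyRange (i + 1) (arr.length : Int) 1) (cnt, arr, lst)
    else if PySem.List.pyGetD arr i "" == "P" && arr.contains "G" then
      pvScanP k i (PySem.List.pyRange (i + 1) (arr.length : Int) 1) (cnt, arr, lst)
    else (cnt, arr, lst)

def Greedy3 (arr : List String) (k : Int) : Int × List String × List (List Int) :=
  (PySem.List.pyRange 0 ((arr.length : Int) - 1) 1).foldl (pvStepA k) (0, arr, [])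

-- ===== PORT B =====
-- `while p < n and arr[p] != t: p += 1` (structural fuel recursion; arr.length steps always suffice for 0 ≤ p)
def pvAdvanceAux (arr : List String) (t : String) : Nat → Int → Int
  | 0, p => p
  | f + 1, p =>
    if p < (arr.length : Int) then
      if PySem.List.pyGetD arr p "" == t then p else pvAdvanceAux arr t f (p + 1)
    else p

def pvAdvance (arr : List String) (t : String) (p : Int) : Int :=
  pvAdvanceAux arr t arr.length p

def pvStepB (k : Int) (st : Int × List String × List (List Int) × Int × Int) (i : Int) :
    Int × List String × List (List Int) × Int × Int :=
  match st with
  | (cnt, arr, lst, pP, pG) =>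
    let v := PySem.List.pyGetD arr i ""
    if v == "G" then
      let q := pvAdvance arr "P" (if pP ≤ i then i + 1 else pP)
      if q < (arr.length : Int) ∧ q - i ≤ k then
        (cnt + 1, PySem.List.pySetD (PySem.List.pySetD arr q "Ppick") i "Gride", lst ++ [[q, i]], q, pG)
      else (cnt, arr, lst, q, pG)
    else if v == "P" then
      let q := pvAdvance arr "G" (if pG ≤ i then i + 1 else pG)
      if q < (arr.length : Int) ∧ q - i ≤ k then
        (cnt + 1, PySem.List.pySetD (PySem.List.pySetD arr i "Ppick") q "Gride", lst ++ [[q, i]], pP, q)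
      else (cnt, arr, lst, pP, q)
    else (cnt, arr, lst, pP, pG)

def Greedy3_alt (arr : List String) (k : Int) : Int × List String × List (List Int) :=
  let r := (PySem.List.pyRange 0 ((arr.length : Int) - 1) 1).foldl (pvStepB k) (0, arr, [], 0, 0)
  (r.1, r.2.1, r.2.2.1)

-- ===== PRECONDITION & SPEC =====
def Spec_Greedy3 (arr : List String) (k : Int) (out : Int × List String × List (List Int)) : Prop := out = Greedy3_alt arr k
instance (arr : List String) (k : Int) (out : Int × List String × List (List Int)) : Decidable (Spec_Greedy3 arr k out) := by unfold Spec_Greedy3; infer_instance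

-- ===== CLAIM (what is proved, stated in full; the proofs are below) =====
def Claim_equal_Greedy3 : Prop := ∀ (arr : List String) (k : Int), Dom_Greedy3 arr k → Spec_Greedy3 arr k (Greedy3 arr k)

-- ===== LEMMAS AND PROOFS =====

theorem pvRange_nil (a b : Int) (h : b ≤ a) : PySem.List.pyRange a b 1 = [] := by
  rw [PySem.List.pyRange_one]
  have hz : (b - a).toNat = 0 := by omega
  rw [hz]
  rfl

-- no index strictly between i and q holds value t (the pointer invariant)
def pvInv (arr : List String) (i q : Int) (t : String) : Prop :=
  ∀ j : Int, i < j → j < q → PySem.List.pyGetD arr j "" ≠ t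

theorem pvAdvanceAux_fuel (arr : List String) (t : String) :
    ∀ (f f' : Nat) (p : Int), ((arr.length : Int) - p).toNat ≤ f → ((arr.length : Int) - p).toNat ≤ f' →
      pvAdvanceAux arr t f p = pvAdvanceAux arr t f' p := by
  intro f
  induction f with
  | zero =>
    intro f' p h h'
    cases f' with
    | zero => rfl
    | succ f' =>
      simp only [pvAdvanceAux]
      rw [if_neg (by omega)]
  | succ f ihf =>
    intro f' p h h'
    cases f' with
    | zero =>
      simp only [pvAdvanceAux]
      rw [if_neg (by omega)]
    | succ f' =>
      simp only [pvAdvanceAux]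
      by_cases hp : p < (arr.length : Int)
      · rw [if_pos hp, if_pos hp]
        by_cases ht : (PySem.List.pyGetD arr p "" == t) = true
        · rw [if_pos ht, if_pos ht]
        · rw [if_neg ht, if_neg ht]
          exact ihf f' (p + 1) (by omega) (by omega)
      · rw [if_neg hp, if_neg hp]

theorem pvAdvance_eq (arr : List String) (t : String) (p : Int) (h0 : 0 ≤ p) :
    pvAdvance arr t p =
      if p < (arr.length : Int) then
        (if PySem.List.pyGetD arr p "" == t then p else pvAdvance arr t (p + 1))
      else p := by
  unfold pvAdvance
  rw [pvAdvanceAux_fuel arr t arr.length (((arr.length : Int) - p).toNat) p (by omega) (le_refl _)]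
  by_cases hp : p < (arr.length : Int)
  · obtain ⟨m, hm⟩ : ∃ m, ((arr.length : Int) - p).toNat = m + 1 :=
      ⟨((arr.length : Int) - p).toNat - 1, by omega⟩
    rw [hm]
    simp only [pvAdvanceAux]
    rw [if_pos hp, if_pos hp]
    by_cases ht : (PySem.List.pyGetD arr p "" == t) = true
    · rw [if_pos ht, if_pos ht]
    · rw [if_neg ht, if_neg ht]
      exact pvAdvanceAux_fuel arr t m arr.length (p + 1) (by omega) (by omega)
  · have hz : ((arr.length : Int) - p).toNat = 0 := by omega
    rw [hz]
    simp only [pvAdvanceAux]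
    rw [if_neg hp]

theorem pvAdvance_spec (arr : List String) (t : String) :
    ∀ (m : Nat) (p : Int), ((arr.length : Int) - p).toNat ≤ m → 0 ≤ p → p ≤ (arr.length : Int) →
      p ≤ pvAdvance arr t p ∧ pvAdvance arr t p ≤ (arr.length : Int) ∧
      (∀ j : Int, p ≤ j → j < pvAdvance arr t p → PySem.List.pyGetD arr j "" ≠ t) ∧
      (pvAdvance arr t p < (arr.length : Int) → PySem.List.pyGetD arr (pvAdvance arr t p) "" = t) := by
  intro m
  induction m with
  | zero =>
    intro p hm hp0 hp
    rw [pvAdvance_eq arr t p hp0, if_neg (by omega)]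
    exact ⟨le_refl _, by omega, fun j h1 h2 => absurd (lt_of_le_of_lt h1 h2) (lt_irrefl _),
      fun h => absurd h (by omega)⟩
  | succ m ih =>
    intro p hm hp0 hp
    by_cases hc : p < (arr.length : Int)
    · rw [pvAdvance_eq arr t p hp0, if_pos hc]
      by_cases ht : (PySem.List.pyGetD arr p "" == t) = true
      · rw [if_pos ht]
        exact ⟨le_refl _, by omega, fun j h1 h2 => absurd (lt_of_le_of_lt h1 h2) (lt_irrefl _),
          fun _ => by simpa using ht⟩
      · rw [if_neg ht]
        obtain ⟨h1, h2, h3, h4⟩ := ih (p + 1) (by omega) (by omega) (by omega)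
        refine ⟨by omega, h2, ?_, h4⟩
        intro j hj1 hj2
        by_cases hjp : j = p
        · subst hjp
          intro hEq
          exact ht (by simp [hEq])
        · exact h3 j (by omega) hj2
    · rw [pvAdvance_eq arr t p hp0, if_neg hc]
      exact ⟨le_refl _, by omega, fun j h1 h2 => absurd (lt_of_le_of_lt h1 h2) (lt_irrefl _),
        fun h => absurd h hc⟩

theorem pvAdvance_skip (arr : List String) (t : String) :
    ∀ (m : Nat) (p q : Int), (q - p).toNat ≤ m → 0 ≤ p → p ≤ q → q ≤ (arr.length : Int) →
      (∀ j : Int, p ≤ j → j < q → PySem.List.pyGetD arr j "" ≠ t) →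
      pvAdvance arr t p = pvAdvance arr t q := by
  intro m
  induction m with
  | zero =>
    intro p q hm hp0 hpq hq hskip
    have he : p = q := by omega
    rw [he]
  | succ m ih =>
    intro p q hm hp0 hpq hq hskip
    by_cases hpq' : p = q
    · rw [hpq']
    · have hplen : p < (arr.length : Int) := by omega
      have hP : ¬ (PySem.List.pyGetD arr p "" == t) = true := by
        simp only [beq_iff_eq]
        exact hskip p (le_refl _) (by omega)
      rw [pvAdvance_eq arr t p hp0, if_pos hplen, if_neg hP]
      exact ih (p + 1) q (by omega) (by omega) (by omega) hq (fun j h1 h2 => hskip j (by omega) h2)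

theorem pvScanG_far (k i : Int) (arr : List String) :
    ∀ (m : Nat) (c : Int) (cnt : Int) (lst : List (List Int)),
      ((arr.length : Int) - c).toNat ≤ m → k < c - i →
      pvScanG k i (PySem.List.pyRange c (arr.length : Int) 1) (cnt, arr, lst) = (cnt, arr, lst) := by
  intro m
  induction m with
  | zero =>
    intro c cnt lst hm hk
    rw [pvRange_nil c (arr.length : Int) (by omega)]
    rfl
  | succ m ih =>
    intro c cnt lst hm hk
    by_cases hc : c < (arr.length : Int)
    · rw [PySem.List.pyRange_one_cons hc]
      simp only [pvScanG]
      by_cases hP : (PySem.List.pyGetD arr c "" == "P") = true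
      · rw [if_pos hP, if_neg (show ¬ c - i ≤ k by omega)]
        exact ih (c + 1) cnt lst (by omega) (by omega)
      · rw [if_neg hP]
        exact ih (c + 1) cnt lst (by omega) (by omega)
    · rw [pvRange_nil c (arr.length : Int) (by omega)]
      rfl

theorem pvScanP_far (k i : Int) (arr : List String) :
    ∀ (m : Nat) (c : Int) (cnt : Int) (lst : List (List Int)),
      ((arr.length : Int) - c).toNat ≤ m → k < c - i →
      pvScanP k i (PySem.List.pyRange c (arr.length : Int) 1) (cnt, arr, lst) = (cnt, arr, lst) := by
  intro m
  induction m with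
  | zero =>
    intro c cnt lst hm hk
    rw [pvRange_nil c (arr.length : Int) (by omega)]
    rfl
  | succ m ih =>
    intro c cnt lst hm hk
    by_cases hc : c < (arr.length : Int)
    · rw [PySem.List.pyRange_one_cons hc]
      simp only [pvScanP]
      by_cases hP : (PySem.List.pyGetD arr c "" == "G") = true
      · rw [if_pos hP, if_neg (show ¬ c - i ≤ k by omega)]
        exact ih (c + 1) cnt lst (by omega) (by omega)
      · rw [if_neg hP]
        exact ih (c + 1) cnt lst (by omega) (by omega)
    · rw [pvRange_nil c (arr.length : Int) (by omega)]
      rfl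

theorem pvScanG_eq (k i : Int) (arr : List String) :
    ∀ (m : Nat) (c : Int) (cnt : Int) (lst : List (List Int)),
      ((arr.length : Int) - c).toNat ≤ m → i < c → 0 ≤ c → c ≤ (arr.length : Int) →
      pvScanG k i (PySem.List.pyRange c (arr.length : Int) 1) (cnt, arr, lst) =
        (if pvAdvance arr "P" c < (arr.length : Int) ∧ pvAdvance arr "P" c - i ≤ k then
          (cnt + 1, PySem.List.pySetD (PySem.List.pySetD arr (pvAdvance arr "P" c) "Ppick") i "Gride",
            lst ++ [[pvAdvance arr "P" c, i]])
        else (cnt, arr, lst)) := by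
  intro m
  induction m with
  | zero =>
    intro c cnt lst hm hic hc0 hcl
    have hqc : pvAdvance arr "P" c = c := by
      rw [pvAdvance_eq arr "P" c hc0, if_neg (by omega)]
    rw [pvRange_nil c (arr.length : Int) (by omega), hqc, if_neg (by omega)]
    rfl
  | succ m ih =>
    intro c cnt lst hm hic hc0 hcl
    by_cases hc : c < (arr.length : Int)
    · rw [PySem.List.pyRange_one_cons hc]
      simp only [pvScanG]
      by_cases hP : (PySem.List.pyGetD arr c "" == "P") = true
      · rw [if_pos hP, pvAdvance_eq arr "P" c hc0, if_pos hc, if_pos hP]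
        by_cases hk : c - i ≤ k
        · rw [if_pos hk, if_pos ⟨hc, hk⟩]
        · rw [if_neg hk, if_neg (by omega)]
          exact pvScanG_far k i arr m (c + 1) cnt lst (by omega) (by omega)
      · rw [if_neg hP, pvAdvance_eq arr "P" c hc0, if_pos hc, if_neg hP]
        exact ih (c + 1) cnt lst (by omega) (by omega) (by omega) (by omega)
    · rw [pvRange_nil c (arr.length : Int) (by omega)]
      rw [pvAdvance_eq arr "P" c hc0, if_neg hc, if_neg (by omega)]
      rfl

theorem pvScanP_eq (k i : Int) (arr : List String) :
    ∀ (m : Nat) (c : Int) (cnt : Int) (lst : List (List Int)),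
      ((arr.length : Int) - c).toNat ≤ m → i < c → 0 ≤ c → c ≤ (arr.length : Int) →
      pvScanP k i (PySem.List.pyRange c (arr.length : Int) 1) (cnt, arr, lst) =
        (if pvAdvance arr "G" c < (arr.length : Int) ∧ pvAdvance arr "G" c - i ≤ k then
          (cnt + 1, PySem.List.pySetD (PySem.List.pySetD arr i "Ppick") (pvAdvance arr "G" c) "Gride",
            lst ++ [[pvAdvance arr "G" c, i]])
        else (cnt, arr, lst)) := by
  intro m
  induction m with
  | zero =>
    intro c cnt lst hm hic hc0 hcl
    have hqc : pvAdvance arr "G" c = c := by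
      rw [pvAdvance_eq arr "G" c hc0, if_neg (by omega)]
    rw [pvRange_nil c (arr.length : Int) (by omega), hqc, if_neg (by omega)]
    rfl
  | succ m ih =>
    intro c cnt lst hm hic hc0 hcl
    by_cases hc : c < (arr.length : Int)
    · rw [PySem.List.pyRange_one_cons hc]
      simp only [pvScanP]
      by_cases hP : (PySem.List.pyGetD arr c "" == "G") = true
      · rw [if_pos hP, pvAdvance_eq arr "G" c hc0, if_pos hc, if_pos hP]
        by_cases hk : c - i ≤ k
        · rw [if_pos hk, if_pos ⟨hc, hk⟩]
        · rw [if_neg hk, if_neg (by omega)]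
          exact pvScanP_far k i arr m (c + 1) cnt lst (by omega) (by omega)
      · rw [if_neg hP, pvAdvance_eq arr "G" c hc0, if_pos hc, if_neg hP]
        exact ih (c + 1) cnt lst (by omega) (by omega) (by omega) (by omega)
    · rw [pvRange_nil c (arr.length : Int) (by omega)]
      rw [pvAdvance_eq arr "G" c hc0, if_neg hc, if_neg (by omega)]
      rfl

theorem pvGetD_two_sets (arr : List String) (a b : Int) (va vb : String) (j : Int)
    (ha : 0 ≤ a) (hb : 0 ≤ b) (h0 : 0 ≤ j) (hj : j < (arr.length : Int)) :
    PySem.List.pyGetD (PySem.List.pySetD (PySem.List.pySetD arr a va) b vb) j "" = vb ∨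
    PySem.List.pyGetD (PySem.List.pySetD (PySem.List.pySetD arr a va) b vb) j "" = va ∨
    PySem.List.pyGetD (PySem.List.pySetD (PySem.List.pySetD arr a va) b vb) j "" = PySem.List.pyGetD arr j "" := by
  rw [PySem.List.pySetD_of_nonneg _ _ ha, PySem.List.pySetD_of_nonneg _ _ hb]
  rw [PySem.List.pyGetD_eq_getElem _ _ h0 (by simpa using hj), PySem.List.pyGetD_eq_getElem _ _ h0 hj]
  rw [List.getElem_set]
  split
  · left; rfl
  · rw [List.getElem_set]
    split
    · right; left; rfl
    · right; right; rfl

theorem pvLoop (k : Int) (n : Nat) :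
    ∀ (m : Nat) (i cnt : Int) (arr : List String) (lst : List (List Int)) (pP pG : Int),
      ((n : Int) - 1 - i).toNat ≤ m → 0 ≤ i → arr.length = n →
      0 ≤ pP → pP ≤ (n : Int) → 0 ≤ pG → pG ≤ (n : Int) →
      pvInv arr i pP "P" → pvInv arr i pG "G" →
      (PySem.List.pyRange i ((n : Int) - 1) 1).foldl (pvStepA k) (cnt, arr, lst) =
        (((PySem.List.pyRange i ((n : Int) - 1) 1).foldl (pvStepB k) (cnt, arr, lst, pP, pG)).1,
         ((PySem.List.pyRange i ((n : Int) - 1) 1).foldl (pvStepB k) (cnt, arr, lst, pP, pG)).2.1,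
         ((PySem.List.pyRange i ((n : Int) - 1) 1).foldl (pvStepB k) (cnt, arr, lst, pP, pG)).2.2.1) := by
  intro m
  induction m with
  | zero =>
    intro i cnt arr lst pP pG hm hi hlen _ _ _ _ _ _
    rw [pvRange_nil i ((n : Int) - 1) (by omega)]
    rfl
  | succ m ih =>
    intro i cnt arr lst pP pG hm hi hlen hP0 hPn hG0 hGn invP invG
    by_cases hilt : i < (n : Int) - 1
    · have hlenI : (arr.length : Int) = (n : Int) := by rw [hlen]
      rw [PySem.List.pyRange_one_cons hilt]
      simp only [List.foldl_cons]
      by_cases hvG : (PySem.List.pyGetD arr i "" == "G") = true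
      · -- arr[i] == 'G'
        have hv' : PySem.List.pyGetD arr i "" = "G" := by simpa using hvG
        have hstepB : pvStepB k (cnt, arr, lst, pP, pG) i =
            (if pvAdvance arr "P" (if pP ≤ i then i + 1 else pP) < (arr.length : Int) ∧
                pvAdvance arr "P" (if pP ≤ i then i + 1 else pP) - i ≤ k then
              (cnt + 1,
                PySem.List.pySetD (PySem.List.pySetD arr (pvAdvance arr "P" (if pP ≤ i then i + 1 else pP)) "Ppick") i "Gride",
                lst ++ [[pvAdvance arr "P" (if pP ≤ i then i + 1 else pP), i]],
                pvAdvance arr "P" (if pP ≤ i then i + 1 else pP), pG)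
            else (cnt, arr, lst, pvAdvance arr "P" (if pP ≤ i then i + 1 else pP), pG)) := by
          simp only [pvStepB]
          rw [if_pos hvG]
        rw [hstepB]
        set c : Int := if pP ≤ i then i + 1 else pP with hcdef
        set q : Int := pvAdvance arr "P" c with hqdef
        have hci : i + 1 ≤ c := by rw [hcdef]; split <;> omega
        have hcn : c ≤ (arr.length : Int) := by rw [hcdef]; split <;> omega
        obtain ⟨hq1, hq2, hq3, hq4⟩ := pvAdvance_spec arr "P" ((arr.length : Int) - c).toNat c (le_refl _) (by omega) hcn
        rw [← hqdef] at hq1 hq2 hq3 hq4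
        have hskip : ∀ j : Int, i + 1 ≤ j → j < c → PySem.List.pyGetD arr j "" ≠ "P" := by
          intro j hj1 hj2
          rw [hcdef] at hj2
          by_cases hpi : pP ≤ i
          · rw [if_pos hpi] at hj2; exact absurd hj2 (by omega)
          · rw [if_neg hpi] at hj2; exact invP j (by omega) hj2
        have hqi : pvAdvance arr "P" (i + 1) = q := by
          rw [hqdef]
          exact pvAdvance_skip arr "P" (c - (i + 1)).toNat (i + 1) c (le_refl _) (by omega) hci hcn hskip
        have hfirst : ∀ j : Int, i + 1 ≤ j → j < q → PySem.List.pyGetD arr j "" ≠ "P" := by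
          intro j hj1 hj2
          by_cases hjc : j < c
          · exact hskip j hj1 hjc
          · exact hq3 j (by omega) hj2
        have hq0 : 0 ≤ q := by omega
        have hqn : q ≤ (n : Int) := by omega
        by_cases hcont : arr.contains "P" = true
        · have hstepA : pvStepA k (cnt, arr, lst) i =
              (if q < (arr.length : Int) ∧ q - i ≤ k then
                (cnt + 1, PySem.List.pySetD (PySem.List.pySetD arr q "Ppick") i "Gride", lst ++ [[q, i]])
              else (cnt, arr, lst)) := by
            simp only [pvStepA]
            rw [if_pos (by rw [hvG, hcont]; rfl)]
            rw [pvScanG_eq k i arr ((arr.length : Int) - (i + 1)).toNat (i + 1) cnt lst (le_refl _) (by omega) (by omega) (by omega)]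
            rw [hqi]
          rw [hstepA]
          have hget : ∀ j : Int, 0 ≤ j → j < (n : Int) → ∀ t : String, t ≠ "Ppick" → t ≠ "Gride" →
              PySem.List.pyGetD arr j "" ≠ t →
              PySem.List.pyGetD (PySem.List.pySetD (PySem.List.pySetD arr q "Ppick") i "Gride") j "" ≠ t := by
            intro j hj0 hjn t ht1 ht2 hold
            rcases pvGetD_two_sets arr q i "Ppick" "Gride" j hq0 hi hj0 (by omega) with h | h | h
            · rw [h]; exact Ne.symm ht2
            · rw [h]; exact Ne.symm ht1
            · rw [h]; exact hold
          by_cases hmatch : q < (arr.length : Int) ∧ q - i ≤ k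
          · rw [if_pos hmatch, if_pos hmatch]
            exact ih (i + 1) (cnt + 1) _ (lst ++ [[q, i]]) q pG (by omega) (by omega)
              (by simp [PySem.List.length_pySetD, hlen]) hq0 hqn hG0 hGn
              (fun j h1 h2 => hget j (by omega) (by omega) "P" (by decide) (by decide) (hfirst j (by omega) h2))
              (fun j h1 h2 => hget j (by omega) (by omega) "G" (by decide) (by decide) (invG j (by omega) h2))
          · rw [if_neg hmatch, if_neg hmatch]
            exact ih (i + 1) cnt arr lst q pG (by omega) (by omega) hlen hq0 hqn hG0 hGn
              (fun j h1 h2 => hfirst j (by omega) h2)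
              (fun j h1 h2 => invG j (by omega) h2)
        · -- no 'P' anywhere in arr: A does nothing, B's pointer runs to the end
          have hnm : "P" ∉ arr := by simpa using hcont
          have hnP : ∀ j : Int, 0 ≤ j → j < (arr.length : Int) → PySem.List.pyGetD arr j "" ≠ "P" := by
            intro j hj0 hjl hP
            refine hnm ?_
            rw [← hP, PySem.List.pyGetD_eq_getElem _ _ hj0 hjl]
            exact List.getElem_mem _
          have hqe : ¬ q < (arr.length : Int) := fun hlt => hnP q hq0 hlt (hq4 hlt)
          have hstepA : pvStepA k (cnt, arr, lst) i = (cnt, arr, lst) := by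
            simp only [pvStepA]
            rw [if_neg (by simp [hnm]), if_neg (by simp [hv'])]
          rw [hstepA, if_neg (show ¬ (q < (arr.length : Int) ∧ q - i ≤ k) from fun h => hqe h.1)]
          exact ih (i + 1) cnt arr lst q pG (by omega) (by omega) hlen hq0 hqn hG0 hGn
            (fun j h1 h2 => hnP j (by omega) (by omega))
            (fun j h1 h2 => invG j (by omega) h2)
      · by_cases hvP : (PySem.List.pyGetD arr i "" == "P") = true
        · -- arr[i] == 'P'
          have hv' : PySem.List.pyGetD arr i "" = "P" := by simpa using hvP
          have hstepB : pvStepB k (cnt, arr, lst, pP, pG) i =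
              (if pvAdvance arr "G" (if pG ≤ i then i + 1 else pG) < (arr.length : Int) ∧
                  pvAdvance arr "G" (if pG ≤ i then i + 1 else pG) - i ≤ k then
                (cnt + 1,
                  PySem.List.pySetD (PySem.List.pySetD arr i "Ppick") (pvAdvance arr "G" (if pG ≤ i then i + 1 else pG)) "Gride",
                  lst ++ [[pvAdvance arr "G" (if pG ≤ i then i + 1 else pG), i]],
                  pP, pvAdvance arr "G" (if pG ≤ i then i + 1 else pG))
              else (cnt, arr, lst, pP, pvAdvance arr "G" (if pG ≤ i then i + 1 else pG))) := by
            simp only [pvStepB]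
            rw [if_neg hvG, if_pos hvP]
          rw [hstepB]
          set c : Int := if pG ≤ i then i + 1 else pG with hcdef
          set q : Int := pvAdvance arr "G" c with hqdef
          have hci : i + 1 ≤ c := by rw [hcdef]; split <;> omega
          have hcn : c ≤ (arr.length : Int) := by rw [hcdef]; split <;> omega
          obtain ⟨hq1, hq2, hq3, hq4⟩ := pvAdvance_spec arr "G" ((arr.length : Int) - c).toNat c (le_refl _) (by omega) hcn
          rw [← hqdef] at hq1 hq2 hq3 hq4
          have hskip : ∀ j : Int, i + 1 ≤ j → j < c → PySem.List.pyGetD arr j "" ≠ "G" := by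
            intro j hj1 hj2
            rw [hcdef] at hj2
            by_cases hpi : pG ≤ i
            · rw [if_pos hpi] at hj2; exact absurd hj2 (by omega)
            · rw [if_neg hpi] at hj2; exact invG j (by omega) hj2
          have hqi : pvAdvance arr "G" (i + 1) = q := by
            rw [hqdef]
            exact pvAdvance_skip arr "G" (c - (i + 1)).toNat (i + 1) c (le_refl _) (by omega) hci hcn hskip
          have hfirst : ∀ j : Int, i + 1 ≤ j → j < q → PySem.List.pyGetD arr j "" ≠ "G" := by
            intro j hj1 hj2
            by_cases hjc : j < c
            · exact hskip j hj1 hjc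
            · exact hq3 j (by omega) hj2
          have hq0 : 0 ≤ q := by omega
          have hqn : q ≤ (n : Int) := by omega
          by_cases hcont : arr.contains "G" = true
          · have hstepA : pvStepA k (cnt, arr, lst) i =
                (if q < (arr.length : Int) ∧ q - i ≤ k then
                  (cnt + 1, PySem.List.pySetD (PySem.List.pySetD arr i "Ppick") q "Gride", lst ++ [[q, i]])
                else (cnt, arr, lst)) := by
              simp only [pvStepA]
              rw [if_neg (by simp [hv']), if_pos (by rw [hvP, hcont]; rfl)]
              rw [pvScanP_eq k i arr ((arr.length : Int) - (i + 1)).toNat (i + 1) cnt lst (le_refl _) (by omega) (by omega) (by omega)]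
              rw [hqi]
            rw [hstepA]
            have hget : ∀ j : Int, 0 ≤ j → j < (n : Int) → ∀ t : String, t ≠ "Ppick" → t ≠ "Gride" →
                PySem.List.pyGetD arr j "" ≠ t →
                PySem.List.pyGetD (PySem.List.pySetD (PySem.List.pySetD arr i "Ppick") q "Gride") j "" ≠ t := by
              intro j hj0 hjn t ht1 ht2 hold
              rcases pvGetD_two_sets arr i q "Ppick" "Gride" j hi hq0 hj0 (by omega) with h | h | h
              · rw [h]; exact Ne.symm ht2
              · rw [h]; exact Ne.symm ht1
              · rw [h]; exact hold
            by_cases hmatch : q < (arr.length : Int) ∧ q - i ≤ k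
            · rw [if_pos hmatch, if_pos hmatch]
              exact ih (i + 1) (cnt + 1) _ (lst ++ [[q, i]]) pP q (by omega) (by omega)
                (by simp [PySem.List.length_pySetD, hlen]) hP0 hPn hq0 hqn
                (fun j h1 h2 => hget j (by omega) (by omega) "P" (by decide) (by decide) (invP j (by omega) h2))
                (fun j h1 h2 => hget j (by omega) (by omega) "G" (by decide) (by decide) (hfirst j (by omega) h2))
            · rw [if_neg hmatch, if_neg hmatch]
              exact ih (i + 1) cnt arr lst pP q (by omega) (by omega) hlen hP0 hPn hq0 hqn
                (fun j h1 h2 => invP j (by omega) h2)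
                (fun j h1 h2 => hfirst j (by omega) h2)
          · have hnm : "G" ∉ arr := by simpa using hcont
            have hnG : ∀ j : Int, 0 ≤ j → j < (arr.length : Int) → PySem.List.pyGetD arr j "" ≠ "G" := by
              intro j hj0 hjl hP
              refine hnm ?_
              rw [← hP, PySem.List.pyGetD_eq_getElem _ _ hj0 hjl]
              exact List.getElem_mem _
            have hqe : ¬ q < (arr.length : Int) := fun hlt => hnG q hq0 hlt (hq4 hlt)
            have hstepA : pvStepA k (cnt, arr, lst) i = (cnt, arr, lst) := by
              simp only [pvStepA]
              rw [if_neg (by simp [hv']), if_neg (by simp [hnm])]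
            rw [hstepA, if_neg (show ¬ (q < (arr.length : Int) ∧ q - i ≤ k) from fun h => hqe h.1)]
            exact ih (i + 1) cnt arr lst pP q (by omega) (by omega) hlen hP0 hPn hq0 hqn
              (fun j h1 h2 => invP j (by omega) h2)
              (fun j h1 h2 => hnG j (by omega) (by omega))
        · -- arr[i] is neither 'G' nor 'P'
          have hstepA : pvStepA k (cnt, arr, lst) i = (cnt, arr, lst) := by
            simp only [pvStepA]
            rw [if_neg (by simp [hvG]), if_neg (by simp [hvP])]
          have hstepB : pvStepB k (cnt, arr, lst, pP, pG) i = (cnt, arr, lst, pP, pG) := by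
            simp only [pvStepB]
            rw [if_neg hvG, if_neg hvP]
          rw [hstepA, hstepB]
          exact ih (i + 1) cnt arr lst pP pG (by omega) (by omega) hlen hP0 hPn hG0 hGn
            (fun j h1 h2 => invP j (by omega) h2)
            (fun j h1 h2 => invG j (by omega) h2)
    · rw [pvRange_nil i ((n : Int) - 1) (by omega)]
      rfl

-- ===== VERDICT (by name: the statement is the Claim_ definition above) =====
theorem Greedy3_spec : Claim_equal_Greedy3 := by
  intro arr k _
  show Greedy3 arr k = Greedy3_alt arr k
  unfold Greedy3 Greedy3_alt
  exact pvLoop k arr.length ((arr.length : Int) - 1 - 0).toNat 0 0 arr [] 0 0 (le_refl _)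
    (le_refl 0) rfl (le_refl 0) (Int.natCast_nonneg _) (le_refl 0) (Int.natCast_nonneg _)
    (fun j h1 h2 => absurd (lt_trans h1 h2) (lt_irrefl 0))
    (fun j h1 h2 => absurd (lt_trans h1 h2) (lt_irrefl 0))
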